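-- pv_equiv track=rewrite | github.com/HussamAnawr/sap_exam | pass69.py | find_sigma_product
-- ===== SOURCE A (Python) =====
-- import math
--
-- def find_divisor(num):
--     divisors = [1]
--     for i in range(2, int(num / 2) + 1):
--         if num % i  == 0:
--             divisors.append(i)
--     return divisors + [num]
--
-- def all_combinations(arr):
--     result = []
--
--     def backtrack(start, current):
--         # Add to results if length >= 2
--         if len(current) >= 2:
--             result.append(current[:])
--
--         # Generate further combinations
--         for i in range(start, len(arr)):
--             current.append(arr[i])
--             backtrack(i + 1, current)  # move to next index
--             current.pop()  # backtrack
--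
--     backtrack(0, [])
--     return result
--
-- def find_sigma_product(nums, target):
--     all_divisier = find_divisor(target)
--     target_divisor = [cd for cd in nums if cd in all_divisier]
--     all_possbile_product = {}
--     for comp in all_combinations(target_divisor):
--         key = tuple(sorted(comp))
--         if math.prod(key) == target:
--             all_possbile_product[key] =  target
--
--     return list(all_possbile_product.keys())
-- ===== SOURCE B (Python) =====
-- def find_sigma_product(nums, target):
--     # O(n) candidate filter by a direct divisor test (no O(target) divisor enumeration),
--     # then pruned DFS: a branch is cut when its running product can no longer divide target.
--     cand = [x for x in nums
--             if x == 1 or x == target or (2 <= x <= target // 2 and target % x == 0)]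
--     n = len(cand)
--     seen = {}
--
--     def dfs(start, prod, current):
--         if len(current) >= 2 and prod == target:
--             seen[tuple(sorted(current))] = target
--         if target != 0 and (prod == 0 or target % prod != 0):
--             return
--         for i in range(start, n):
--             current.append(cand[i])
--             dfs(i + 1, prod * cand[i], current)
--             current.pop()
--
--     dfs(0, 1, [])
--     return list(seen)
-- ===== Notes on version B (the rewrite author's own statement) =====
-- stated objective: faster
-- what changed: B replaces A's O(target) divisor-list enumeration by a per-element O(1) divisor test, and replaces A's exhaustive generation of all 2^k subsets followed by filtering with a divisibility-pruned DFS that cuts every branch whose running product cannot divide the target.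
import Mathlib
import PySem

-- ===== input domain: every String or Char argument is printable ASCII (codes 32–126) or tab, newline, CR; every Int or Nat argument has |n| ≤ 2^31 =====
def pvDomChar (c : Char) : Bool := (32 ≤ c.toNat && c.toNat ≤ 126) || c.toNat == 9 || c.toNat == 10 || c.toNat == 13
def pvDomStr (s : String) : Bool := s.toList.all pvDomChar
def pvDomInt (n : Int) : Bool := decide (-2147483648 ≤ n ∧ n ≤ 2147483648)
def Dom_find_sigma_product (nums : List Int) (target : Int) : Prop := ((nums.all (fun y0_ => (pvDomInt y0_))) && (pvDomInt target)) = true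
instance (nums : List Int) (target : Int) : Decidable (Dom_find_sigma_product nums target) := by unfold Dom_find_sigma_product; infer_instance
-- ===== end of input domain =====

-- B replaces A's O(target) divisor-list enumeration by a per-element divisor test and A's
-- exhaustive subset generation by a divisibility-pruned DFS; the return value is equal
-- (A mutates only its own local lists, so there is no observable side effect).

-- ===== PORT A =====
-- find_divisor: int(num/2) is PySem.Int.truncdiv num 2, exact on the domain (|num| ≤ 2^31 < 2^53).
def find_divisor (num : Int) : List Int :=
  let divisors := (PySem.List.pyRange 2 (PySem.Int.truncdiv num 2 + 1) 1).foldl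
    (fun ds i => if PySem.Int.mod num i == 0 then ds ++ [i] else ds) [1]
  divisors ++ [num]

-- all_combinations: the index loop 'for i in range(start, len(arr))' recursing with i+1 is
-- ported as the same recursion over the suffix arr[start:]; current is recorded in preorder.
mutual
def pvBtA (current : List Int) (rest : List Int) : List (List Int) :=
  (if 2 ≤ current.length then [current] else []) ++ pvLoopA current rest
termination_by (rest.length, 1)
def pvLoopA (current : List Int) (rest : List Int) : List (List Int) :=
  match rest with
  | [] => []
  | x :: rs => pvBtA (current ++ [x]) rs ++ pvLoopA current rs
termination_by (rest.length, 0)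
end

def all_combinations (arr : List Int) : List (List Int) := pvBtA [] arr

def find_sigma_product (nums : List Int) (target : Int) : List (List Int) :=
  let all_divisier := find_divisor target
  let target_divisor := nums.filter (fun cd => all_divisier.contains cd)
  let d := (all_combinations target_divisor).foldl
    (fun (d : PySem.Dict (List Int) Int) comp =>
      let key := PySem.List.sorted comp (fun x => x) false
      if key.foldl (· * ·) 1 == target then d.insert key target else d)   -- math.prod(key)
    PySem.Dict.empty
  d.keys

-- ===== PORT B =====
-- B's direct divisor test (the list-comprehension condition in Source B)
def pvIsDiv (target : Int) (x : Int) : Bool :=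
  x == 1 || x == target ||
    (2 ≤ x && x ≤ PySem.Int.floordiv target 2 && PySem.Int.mod target x == 0)

-- B's dfs, with the same suffix-recursion rendering of 'for i in range(start, n)'.
mutual
def pvDfsB (target : Int) (prod : Int) (current : List Int) (rest : List Int)
    (seen : PySem.Dict (List Int) Int) : PySem.Dict (List Int) Int :=
  let seen1 := if 2 ≤ current.length && prod == target then
      seen.insert (PySem.List.sorted current (fun x => x) false) target
    else seen
  if target != 0 && (prod == 0 || PySem.Int.mod target prod != 0) then seen1
  else pvLoopB target prod current rest seen1
termination_by (rest.length, 1)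
def pvLoopB (target : Int) (prod : Int) (current : List Int) (rest : List Int)
    (seen : PySem.Dict (List Int) Int) : PySem.Dict (List Int) Int :=
  match rest with
  | [] => seen
  | x :: rs => pvLoopB target prod current rs (pvDfsB target (prod * x) (current ++ [x]) rs seen)
termination_by (rest.length, 0)
end

def find_sigma_product_alt (nums : List Int) (target : Int) : List (List Int) :=
  let cand := nums.filter (pvIsDiv target)
  (pvDfsB target 1 [] cand PySem.Dict.empty).keys

-- ===== PRECONDITION & SPEC =====
def Spec_find_sigma_product (nums : List Int) (target : Int) (out : List (List Int)) : Prop := out = find_sigma_product_alt nums target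
instance (nums : List Int) (target : Int) (out : List (List Int)) : Decidable (Spec_find_sigma_product nums target out) := by unfold Spec_find_sigma_product; infer_instance

-- ===== CLAIM (what is proved, stated in full; the proofs are below) =====
def Claim_equal_find_sigma_product : Prop := ∀ (nums : List Int) (target : Int), Dom_find_sigma_product nums target → Spec_find_sigma_product nums target (find_sigma_product nums target)

-- ===== LEMMAS AND PROOFS =====

-- A's per-combination dict step (definitionally the lambda in find_sigma_product's fold)
def pvStepA (target : Int) (d : PySem.Dict (List Int) Int) (comp : List Int) : PySem.Dict (List Int) Int :=
  let key := PySem.List.sorted comp (fun x => x) false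
  if key.foldl (· * ·) 1 == target then d.insert key target else d

-- A's x ≤ int(t/2) bound and B's x ≤ t//2 bound agree for x ≥ 2
theorem pv_div2_iff (t x : Int) (h2 : 2 ≤ x) :
    x ≤ PySem.Int.truncdiv t 2 ↔ x ≤ PySem.Int.floordiv t 2 := by
  have ht : PySem.Int.truncdiv t 2 = t.tdiv 2 := by simp [PySem.Int.truncdiv]
  have hf : PySem.Int.floordiv t 2 = t.fdiv 2 := by simp [PySem.Int.floordiv]
  rw [ht, hf]
  rcases lt_or_ge t 0 with h | h
  · have h1 : t.tdiv 2 ≤ 0 := by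
      rw [Int.tdiv_eq_ediv]
      simp only [Int.sign_eq_one_of_pos (by norm_num : (0:Int) < 2)]
      split_ifs <;> omega
    have h3 : t.fdiv 2 ≤ 0 := by rw [Int.fdiv_eq_ediv]; split_ifs <;> omega
    omega
  · rw [Int.tdiv_eq_ediv_of_nonneg h, Int.fdiv_eq_ediv]; simp

-- membership in A's divisor list is exactly B's divisor test
theorem pv_contains (t x : Int) : (find_divisor t).contains x = pvIsDiv t x := by
  rw [Bool.eq_iff_iff, List.contains_iff_mem]
  simp only [find_divisor, pvIsDiv, PySem.List.foldl_append_ite_eq_filter,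
    List.mem_append, List.mem_filter, List.mem_cons,
    PySem.List.mem_pyRange_one, Bool.or_eq_true, Bool.and_eq_true, beq_iff_eq,
    decide_eq_true_eq, List.not_mem_nil, or_false]
  constructor
  · rintro ((h1 | ⟨⟨hge, hlt⟩, hmod⟩) | hx)
    · exact Or.inl (Or.inl h1)
    · exact Or.inr ⟨⟨hge, (pv_div2_iff t x hge).mp (by omega)⟩, hmod⟩
    · exact Or.inl (Or.inr hx)
  · rintro ((h1 | hx) | ⟨⟨hge, hle⟩, hmod⟩)
    · exact Or.inl (Or.inl h1)
    · exact Or.inr hx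
    · exact Or.inl (Or.inr ⟨⟨hge, by have := (pv_div2_iff t x hge).mpr hle; omega⟩, hmod⟩)

-- sorting does not change the product
theorem pv_sorted_prod (l : List Int) :
    (PySem.List.sorted l (fun x => x) false).foldl (· * ·) 1 = l.foldl (· * ·) 1 := by
  rw [List.prod_eq_foldl.symm, List.prod_eq_foldl.symm]
  exact (PySem.List.sorted_perm l (fun x => x) false).prod_eq

-- every combination generated strictly below a node extends that node's current
theorem pv_loopA_extends (rest : List Int) :
    ∀ (current : List Int), ∀ c ∈ pvLoopA current rest, ∃ e, c = current ++ e := by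
  induction rest with
  | nil => intro current c hc; simp [pvLoopA] at hc
  | cons x rs ih =>
    intro current c hc
    rw [pvLoopA] at hc
    rcases List.mem_append.mp hc with h | h
    · rw [pvBtA] at h
      rcases List.mem_append.mp h with h' | h'
      · have hc' : c = current ++ [x] := by
          by_cases h2 : 2 ≤ (current ++ [x]).length
          · exact ((by simpa [h2] using h' : 1 ≤ current.length ∧ c = current ++ [x])).2
          · have hcur : current = [] := by simpa using h2
            simp [hcur] at h'
        exact ⟨[x], hc'⟩
      · obtain ⟨e, he⟩ := ih (current ++ [x]) c h'
        exact ⟨[x] ++ e, by simp [he]⟩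
    · exact ih current c h

-- B's record step equals A's fold over the node's recorded slot
theorem pv_record (target prod : Int) (cur : List Int) (seen : PySem.Dict (List Int) Int)
    (hprod : prod = cur.foldl (· * ·) 1) :
    (if 2 ≤ cur.length then [cur] else []).foldl (pvStepA target) seen
      = (if 2 ≤ cur.length && prod == target then
          seen.insert (PySem.List.sorted cur (fun x => x) false) target
        else seen) := by
  by_cases h2 : 2 ≤ cur.length
  · by_cases ht : prod = target
    · simp [h2, ht, pvStepA, pv_sorted_prod, ← hprod]
    · simp [h2, ht, pvStepA, pv_sorted_prod, ← hprod]
  · simp [h2]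

-- when B prunes, no combination below the node can match, so A's fold is the identity there
theorem pv_prune (target prod : Int) (cur rest : List Int) (seen : PySem.Dict (List Int) Int)
    (hprod : prod = cur.foldl (· * ·) 1)
    (hc : (target != 0 && (prod == 0 || PySem.Int.mod target prod != 0)) = true) :
    (pvLoopA cur rest).foldl (pvStepA target) seen = seen := by
  have hstep : pvStepA target = fun (d : PySem.Dict (List Int) Int) comp =>
      if ((PySem.List.sorted comp (fun x => x) false).foldl (· * ·) 1 == target)
      then d.insert (PySem.List.sorted comp (fun x => x) false) target else d := rfl
  rw [hstep, PySem.List.foldl_if_eq_foldl_filter]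
  have hnil : (pvLoopA cur rest).filter
      (fun comp => ((PySem.List.sorted comp (fun x => x) false).foldl (· * ·) 1 == target)) = [] := by
    rw [List.filter_eq_nil_iff]
    intro c hcmem
    obtain ⟨e, he⟩ := pv_loopA_extends rest cur c hcmem
    simp only [beq_eq_false_iff_ne, ne_eq, Bool.not_eq_true]
    rw [pv_sorted_prod, he, List.prod_eq_foldl.symm, List.prod_append]
    simp only [bne_iff_ne, ne_eq, Bool.or_eq_true, Bool.and_eq_true, beq_iff_eq] at hc
    obtain ⟨ht0, hor⟩ := hc
    have hcp : cur.prod = prod := by rw [hprod, List.prod_eq_foldl]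
    rw [hcp]
    rcases hor with h0 | hmod
    · simp [h0, Ne.symm ht0]
    · intro habs
      have : prod ∣ target := ⟨e.prod, habs.symm⟩
      rw [← PySem.Int.mod_eq_zero_iff_dvd] at this
      exact hmod this
  rw [hnil]
  rfl

-- one dfs node, given the loop simulation at the same node
theorem pv_dfs_of_loop (target prod : Int) (cur rest : List Int) (seen : PySem.Dict (List Int) Int)
    (hprod : prod = cur.foldl (· * ·) 1)
    (hloop : ∀ s, pvLoopB target prod cur rest s = (pvLoopA cur rest).foldl (pvStepA target) s) :
    pvDfsB target prod cur rest seen = (pvBtA cur rest).foldl (pvStepA target) seen := by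
  rw [pvDfsB, pvBtA, List.foldl_append, pv_record target prod cur seen hprod]
  by_cases hpr : (target != 0 && (prod == 0 || PySem.Int.mod target prod != 0)) = true
  · simp only [hpr, if_true]
    exact (pv_prune target prod cur rest _ hprod hpr).symm
  · simp only [hpr]
    exact hloop _

-- main simulation: the pruned DFS equals A's fold of the full enumeration
theorem pv_main (target : Int) : ∀ (n : Nat) (rest : List Int), rest.length ≤ n →
    (∀ (cur : List Int) (prod : Int) (seen : PySem.Dict (List Int) Int),
        prod = cur.foldl (· * ·) 1 →
        pvLoopB target prod cur rest seen = (pvLoopA cur rest).foldl (pvStepA target) seen) ∧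
    (∀ (cur : List Int) (prod : Int) (seen : PySem.Dict (List Int) Int),
        prod = cur.foldl (· * ·) 1 →
        pvDfsB target prod cur rest seen = (pvBtA cur rest).foldl (pvStepA target) seen) := by
  intro n
  induction n with
  | zero =>
    intro rest hlen
    have hnil : rest = [] := List.eq_nil_of_length_eq_zero (Nat.le_zero.mp hlen)
    subst hnil
    have hloop : ∀ (cur : List Int) (prod : Int) (seen : PySem.Dict (List Int) Int),
        prod = cur.foldl (· * ·) 1 →
        pvLoopB target prod cur [] seen = (pvLoopA cur []).foldl (pvStepA target) seen := by
      intro cur prod seen _; rw [pvLoopB, pvLoopA]; rfl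
    exact ⟨hloop, fun cur prod seen hp =>
      pv_dfs_of_loop target prod cur [] seen hp (fun s => hloop cur prod s hp)⟩
  | succ m ih =>
    intro rest hlen
    have hloop : ∀ (cur : List Int) (prod : Int) (seen : PySem.Dict (List Int) Int),
        prod = cur.foldl (· * ·) 1 →
        pvLoopB target prod cur rest seen = (pvLoopA cur rest).foldl (pvStepA target) seen := by
      intro cur prod seen hp
      match rest, hlen with
      | [], _ => rw [pvLoopB, pvLoopA]; rfl
      | x :: rs, hlen =>
        have hrs : rs.length ≤ m := by simpa using hlen
        have hp' : prod * x = (cur ++ [x]).foldl (· * ·) 1 := by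
          rw [List.foldl_append, ← hp]; rfl
        rw [pvLoopB, pvLoopA, List.foldl_append,
          (ih rs hrs).2 (cur ++ [x]) (prod * x) seen hp',
          (ih rs hrs).1 cur prod _ hp]
    exact ⟨hloop, fun cur prod seen hp =>
      pv_dfs_of_loop target prod cur rest seen hp (fun s => hloop cur prod s hp)⟩

-- ===== VERDICT (by name: the statement is the Claim_ definition above) =====
theorem find_sigma_product_spec : Claim_equal_find_sigma_product := by
  intro nums target _
  show (List.foldl (pvStepA target) PySem.Dict.empty
      (all_combinations (nums.filter (fun cd => (find_divisor target).contains cd)))).keys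
    = (pvDfsB target 1 [] (nums.filter (pvIsDiv target)) PySem.Dict.empty).keys
  simp only [pv_contains]
  rw [all_combinations,
    ((pv_main target (nums.filter (pvIsDiv target)).length (nums.filter (pvIsDiv target)) le_rfl).2
      [] 1 PySem.Dict.empty rfl)]
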